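-- pv_equiv track=rewrite | github.com/take-works-tech/arc-agi2-arc2025 | src/hybrid_system/data_management/transformation/data_transformer.py | _smooth_grid_data
-- ===== SOURCE A (Python) =====
-- from typing import List, Dict, Any, Optional, Union, Callable
--
-- def _smooth_grid_data(grid: List[List[int]]) -> List[List[int]]:
--     """グリッド平滑化"""
--     if not grid:
--         return grid
--
--     height, width = len(grid), len(grid[0])
--     new_grid = [[0 for _ in range(width)] for _ in range(height)]
--
--     for i in range(height):
--         for j in range(width):
--             # 周囲のピクセルの平均を計算
--             neighbors = []
--             for di in [-1, 0, 1]: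
--                 for dj in [-1, 0, 1]:
--                     ni, nj = i + di, j + dj
--                     if 0 <= ni < height and 0 <= nj < width:
--                         neighbors.append(grid[ni][nj])
--
--             if neighbors:
--                 new_grid[i][j] = round(sum(neighbors) / len(neighbors))
--             else:
--                 new_grid[i][j] = grid[i][j]
--
--     return new_grid
-- ===== SOURCE B (Python) =====
-- from typing import List
--
--
-- def _round_half_even(n: int, d: int) -> int:
--     q, r = divmod(n, d)
--     if 2 * r < d:
--         return q
--     if 2 * r > d:
--         return q + 1
--     return q if q % 2 == 0 else q + 1
--
--
-- def _smooth_grid_data(grid: List[List[int]]) -> List[List[int]]: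
--     if not grid:
--         return grid
--     height, width = len(grid), len(grid[0])
--     hs = [[row[j] + (row[j - 1] if j > 0 else 0) + (row[j + 1] if j + 1 < width else 0)
--            for j in range(width)] for row in grid]
--     out = []
--     for i in range(height):
--         rows = 1 + (1 if i > 0 else 0) + (1 if i + 1 < height else 0)
--         up = hs[i - 1] if i > 0 else None
--         down = hs[i + 1] if i + 1 < height else None
--         out.append([
--             _round_half_even(hs[i][j] + (up[j] if up is not None else 0)
--                              + (down[j] if down is not None else 0),
--                              rows * (1 + (1 if j > 0 else 0) + (1 if j + 1 < width else 0)))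
--             for j in range(width)])
--     return out
-- ===== Notes on version B (the rewrite author's own statement) =====
-- stated objective: faster
-- what changed: Replaces per-cell enumeration of up to 9 neighbours into a list by a separable two-pass box blur (a horizontal pass of guarded three-term row sums, then a vertical pass adding at most three row results), with the float round(sum/len) replaced by exact integer half-to-even rounding.
import Mathlib
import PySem

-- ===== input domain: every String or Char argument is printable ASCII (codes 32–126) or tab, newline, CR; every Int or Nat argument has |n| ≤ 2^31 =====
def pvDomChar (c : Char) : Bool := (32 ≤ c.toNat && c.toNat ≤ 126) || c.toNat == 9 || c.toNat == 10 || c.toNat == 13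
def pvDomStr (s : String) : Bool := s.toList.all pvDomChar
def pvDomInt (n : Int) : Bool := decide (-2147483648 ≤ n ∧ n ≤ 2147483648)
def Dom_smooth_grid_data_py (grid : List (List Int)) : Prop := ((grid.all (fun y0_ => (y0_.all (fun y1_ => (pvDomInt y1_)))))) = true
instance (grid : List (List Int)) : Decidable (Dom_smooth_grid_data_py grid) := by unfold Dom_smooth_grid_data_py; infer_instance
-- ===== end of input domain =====

-- B replaces A's per-cell 9-neighbour enumeration by a separable two-pass box blur
-- (horizontal clamped-window row sums, then a vertical pass) with exact integer
-- half-to-even rounding in place of round(sum/len); return value only, no mutation.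

-- round(n / d) for d > 0: Python's float round is exact integer half-to-even here
-- (on Dom the quotient's distance from a half-integer is either 0 — exactly
-- representable — or ≥ 1/6, far above the double rounding error), so both ports
-- use this integer transcription.
def pvRoundHalfEven (n d : Int) : Int :=
  let q := PySem.Int.floordiv n d
  let r := PySem.Int.mod n d
  if 2 * r < d then q
  else if 2 * r > d then q + 1
  else if PySem.Int.mod q 2 = 0 then q else q + 1

-- grid[r][c]: under Pre_ every access A performs is in range, so pyGetD is exact here
def pvVal (grid : List (List Int)) (r c : Int) : Int :=
  PySem.List.pyGetD (PySem.List.pyGetD grid r []) c 0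

-- ===== PORT A =====
-- the neighbors list A builds at cell (i, j)
def pvNeighbors (grid : List (List Int)) (height width i j : Int) : List Int :=
  [(-1 : Int), 0, 1].foldl (fun acc di =>
    [(-1 : Int), 0, 1].foldl (fun acc2 dj =>
      let ni := i + di
      let nj := j + dj
      if 0 ≤ ni ∧ ni < height ∧ 0 ≤ nj ∧ nj < width then
        acc2 ++ [pvVal grid ni nj]
      else acc2) acc) []

def smooth_grid_data_py (grid : List (List Int)) : List (List Int) :=
  match grid with
  | [] => grid
  | g0 :: _ =>
    let height : Int := grid.length
    let width : Int := g0.length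
    (PySem.List.pyRange 0 height 1).map (fun i =>
      (PySem.List.pyRange 0 width 1).map (fun j =>
        let ns := pvNeighbors grid height width i j
        if ns ≠ [] then pvRoundHalfEven ns.sum ns.length
        else pvVal grid i j))

-- ===== PORT B =====
def smooth_grid_data_py_alt (grid : List (List Int)) : List (List Int) :=
  match grid with
  | [] => grid
  | g0 :: _ =>
    let height : Int := grid.length
    let width : Int := g0.length
    -- horizontal pass: hs[i][j] = row i summed over the clamped column window of j
    let hs : List (List Int) := grid.map (fun row =>
      (PySem.List.pyRange 0 width 1).map (fun j =>
        PySem.List.pyGetD row j 0 +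
        (if 0 < j then PySem.List.pyGetD row (j - 1) 0 else 0) +
        (if j + 1 < width then PySem.List.pyGetD row (j + 1) 0 else 0)))
    (PySem.List.pyRange 0 height 1).map (fun i =>
      let rows : Int := 1 + (if 0 < i then 1 else 0) + (if i + 1 < height then 1 else 0)
      -- 'up'/'down' are None exactly when 0 < i / i + 1 < height fail, so the guarded
      -- lookups below transcribe the '… if up is not None else 0' terms
      (PySem.List.pyRange 0 width 1).map (fun j =>
        pvRoundHalfEven
          (PySem.List.pyGetD (PySem.List.pyGetD hs i []) j 0 +
            (if 0 < i then PySem.List.pyGetD (PySem.List.pyGetD hs (i - 1) []) j 0 else 0) +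
            (if i + 1 < height then PySem.List.pyGetD (PySem.List.pyGetD hs (i + 1) []) j 0 else 0))
          (rows * (1 + (if 0 < j then 1 else 0) + (if j + 1 < width then 1 else 0)))))

-- ===== PRECONDITION & SPEC =====
-- A raises IndexError exactly when some row is shorter than len(grid[0]) (each cell
-- reads its own row up to column width-1); Pre_ admits precisely the grids A returns on.
def Pre_smooth_grid_data_py (grid : List (List Int)) : Prop :=
  ∀ row ∈ grid, grid.headI.length ≤ row.length
instance (grid : List (List Int)) : Decidable (Pre_smooth_grid_data_py grid) := by
  unfold Pre_smooth_grid_data_py; infer_instance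

def pvWitness_smooth_grid_data_py : List (List Int) := [[1, 2], [3, 4]]

def Spec_smooth_grid_data_py (grid : List (List Int)) (out : List (List Int)) : Prop := out = smooth_grid_data_py_alt grid
instance (grid : List (List Int)) (out : List (List Int)) : Decidable (Spec_smooth_grid_data_py grid out) := by unfold Spec_smooth_grid_data_py; infer_instance

-- ===== CLAIM (what is proved, stated in full; the proofs are below) =====
def Claim_equal_smooth_grid_data_py : Prop := ∀ (grid : List (List Int)), Dom_smooth_grid_data_py grid → Pre_smooth_grid_data_py grid → Spec_smooth_grid_data_py grid (smooth_grid_data_py grid)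

-- ===== LEMMAS AND PROOFS =====

-- if-append shape of one fold step
lemma pvIteApp (P : Prop) [Decidable P] (acc : List Int) (v : Int) :
    (if P then acc ++ [v] else acc) = acc ++ (if P then [v] else []) := by
  split <;> simp

-- closed form of the neighbors list: nine guarded singletons
lemma pvNeighbors_eq (grid : List (List Int)) (h w i j : Int) :
    pvNeighbors grid h w i j = ((if 0 ≤ i - 1 ∧ i - 1 < h ∧ 0 ≤ j - 1 ∧ j - 1 < w then [pvVal grid (i-1) (j-1)] else []) ++ ((if 0 ≤ i - 1 ∧ i - 1 < h ∧ 0 ≤ j ∧ j < w then [pvVal grid (i-1) j] else []) ++ ((if 0 ≤ i - 1 ∧ i - 1 < h ∧ 0 ≤ j + 1 ∧ j + 1 < w then [pvVal grid (i-1) (j+1)] else []) ++ ((if 0 ≤ i ∧ i < h ∧ 0 ≤ j - 1 ∧ j - 1 < w then [pvVal grid i (j-1)] else []) ++ ((if 0 ≤ i ∧ i < h ∧ 0 ≤ j ∧ j < w then [pvVal grid i j] else []) ++ ((if 0 ≤ i ∧ i < h ∧ 0 ≤ j + 1 ∧ j + 1 < w then [pvVal grid i (j+1)] else []) ++ ((if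 0 ≤ i + 1 ∧ i + 1 < h ∧ 0 ≤ j - 1 ∧ j - 1 < w then [pvVal grid (i+1) (j-1)] else []) ++ ((if 0 ≤ i + 1 ∧ i + 1 < h ∧ 0 ≤ j ∧ j < w then [pvVal grid (i+1) j] else []) ++ (if 0 ≤ i + 1 ∧ i + 1 < h ∧ 0 ≤ j + 1 ∧ j + 1 < w then [pvVal grid (i+1) (j+1)] else []))))))))) := by
  have e1 : i + -1 = i - 1 := by ring
  have e2 : j + -1 = j - 1 := by ring
  simp only [pvNeighbors, List.foldl, e1, e2, add_zero]
  simp only [pvIteApp]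
  simp only [List.nil_append, List.append_assoc]

-- A's neighbour sum, grouped row by row in B's order
lemma pvNs_sum (grid : List (List Int)) (h w i j : Int)
    (h0 : 0 ≤ i) (h1 : i < h) (h2 : 0 ≤ j) (h3 : j < w) :
    (pvNeighbors grid h w i j).sum
      = (pvVal grid i j + (if 0 < j then pvVal grid i (j-1) else 0) +
          (if j + 1 < w then pvVal grid i (j+1) else 0))
        + (if 0 < i then
            pvVal grid (i-1) j + (if 0 < j then pvVal grid (i-1) (j-1) else 0) +
            (if j + 1 < w then pvVal grid (i-1) (j+1) else 0) else 0)
        + (if i + 1 < h then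
            pvVal grid (i+1) j + (if 0 < j then pvVal grid (i+1) (j-1) else 0) +
            (if j + 1 < w then pvVal grid (i+1) (j+1) else 0) else 0) := by
  have f1 : i - 1 < h := by omega
  have f2 : 0 ≤ i + 1 := by omega
  have f3 : j - 1 < w := by omega
  have f4 : 0 ≤ j + 1 := by omega
  rw [pvNeighbors_eq]
  by_cases hA : (1:Int) ≤ i <;> by_cases hB : i + 1 < h <;>
    by_cases hC : (1:Int) ≤ j <;> by_cases hD : j + 1 < w <;>
    simp [hA, hB, hC, hD, f1, f2, f3, f4, h0, h1, h2, h3, Int.lt_iff_add_one_le] <;> ring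

-- A's neighbour count is the product of the window dimensions
lemma pvNs_len (grid : List (List Int)) (h w i j : Int)
    (h0 : 0 ≤ i) (h1 : i < h) (h2 : 0 ≤ j) (h3 : j < w) :
    ((pvNeighbors grid h w i j).length : Int)
      = (1 + (if 0 < i then 1 else 0) + (if i + 1 < h then 1 else 0))
        * (1 + (if 0 < j then 1 else 0) + (if j + 1 < w then 1 else 0)) := by
  have f1 : i - 1 < h := by omega
  have f2 : 0 ≤ i + 1 := by omega
  have f3 : j - 1 < w := by omega
  have f4 : 0 ≤ j + 1 := by omega
  rw [pvNeighbors_eq]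
  by_cases hA : (1:Int) ≤ i <;> by_cases hB : i + 1 < h <;>
    by_cases hC : (1:Int) ≤ j <;> by_cases hD : j + 1 < w <;>
    simp [hA, hB, hC, hD, f1, f2, f3, f4, h0, h1, h2, h3, Int.lt_iff_add_one_le]

lemma pvNs_ne_nil (grid : List (List Int)) (h w i j : Int)
    (h0 : 0 ≤ i) (h1 : i < h) (h2 : 0 ≤ j) (h3 : j < w) :
    pvNeighbors grid h w i j ≠ [] := by
  intro hnil
  have := pvNs_len grid h w i j h0 h1 h2 h3
  rw [hnil] at this
  simp at this
  split_ifs at this <;> omega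

-- one lookup into the horizontal pass equals the guarded three-term column sum at (r, j)
lemma pvHs_get (grid : List (List Int)) (w r j : Int)
    (hr0 : 0 ≤ r) (hr1 : r < (grid.length : Int)) (hj0 : 0 ≤ j) (hj1 : j < w) :
    PySem.List.pyGetD
      (PySem.List.pyGetD
        (grid.map (fun row =>
          (PySem.List.pyRange 0 w 1).map (fun j =>
            PySem.List.pyGetD row j 0 +
            (if 0 < j then PySem.List.pyGetD row (j - 1) 0 else 0) +
            (if j + 1 < w then PySem.List.pyGetD row (j + 1) 0 else 0)))) r []) j 0
      = pvVal grid r j + (if 0 < j then pvVal grid r (j-1) else 0) +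
        (if j + 1 < w then pvVal grid r (j+1) else 0) := by
  have hlen : r < ((grid.map (fun row =>
      (PySem.List.pyRange 0 w 1).map (fun j =>
        PySem.List.pyGetD row j 0 +
        (if 0 < j then PySem.List.pyGetD row (j - 1) 0 else 0) +
        (if j + 1 < w then PySem.List.pyGetD row (j + 1) 0 else 0)))).length : Int) := by
    simpa using hr1
  rw [PySem.List.pyGetD_eq_getElem _ [] hr0 hlen, List.getElem_map,
      PySem.List.pyGetD_map_pyRange_of_nonneg _ w j 0 hj0 hj1]
  have hrow : PySem.List.pyGetD grid r [] = grid[r.toNat]'(by omega) :=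
    PySem.List.pyGetD_eq_getElem grid [] hr0 hr1
  simp only [pvVal, hrow]

-- B's vertical sum equals A's neighbour sum expansion
lemma pvB_sum (grid : List (List Int)) (w i j : Int)
    (h0 : 0 ≤ i) (h1 : i < (grid.length : Int)) (h2 : 0 ≤ j) (h3 : j < w) :
    (PySem.List.pyGetD (PySem.List.pyGetD
        (grid.map (fun row =>
          (PySem.List.pyRange 0 w 1).map (fun j =>
            PySem.List.pyGetD row j 0 +
            (if 0 < j then PySem.List.pyGetD row (j - 1) 0 else 0) +
            (if j + 1 < w then PySem.List.pyGetD row (j + 1) 0 else 0)))) i []) j 0 +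
      (if 0 < i then PySem.List.pyGetD (PySem.List.pyGetD
        (grid.map (fun row =>
          (PySem.List.pyRange 0 w 1).map (fun j =>
            PySem.List.pyGetD row j 0 +
            (if 0 < j then PySem.List.pyGetD row (j - 1) 0 else 0) +
            (if j + 1 < w then PySem.List.pyGetD row (j + 1) 0 else 0)))) (i - 1) []) j 0 else 0) +
      (if i + 1 < (grid.length : Int) then PySem.List.pyGetD (PySem.List.pyGetD
        (grid.map (fun row =>
          (PySem.List.pyRange 0 w 1).map (fun j =>
            PySem.List.pyGetD row j 0 +
            (if 0 < j then PySem.List.pyGetD row (j - 1) 0 else 0) +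
            (if j + 1 < w then PySem.List.pyGetD row (j + 1) 0 else 0)))) (i + 1) []) j 0 else 0))
      = (pvVal grid i j + (if 0 < j then pvVal grid i (j-1) else 0) +
          (if j + 1 < w then pvVal grid i (j+1) else 0))
        + (if 0 < i then
            pvVal grid (i-1) j + (if 0 < j then pvVal grid (i-1) (j-1) else 0) +
            (if j + 1 < w then pvVal grid (i-1) (j+1) else 0) else 0)
        + (if i + 1 < (grid.length : Int) then
            pvVal grid (i+1) j + (if 0 < j then pvVal grid (i+1) (j-1) else 0) +
            (if j + 1 < w then pvVal grid (i+1) (j+1) else 0) else 0) := by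
  rw [pvHs_get grid w i j h0 h1 h2 h3]
  by_cases hA : (0:Int) < i <;> by_cases hB : i + 1 < (grid.length : Int)
  · simp [hA, hB, pvHs_get grid w (i-1) j (by omega) (by omega) h2 h3,
          pvHs_get grid w (i+1) j (by omega) hB h2 h3]
  · simp [hA, hB, pvHs_get grid w (i-1) j (by omega) (by omega) h2 h3]
  · simp [hA, hB, pvHs_get grid w (i+1) j (by omega) hB h2 h3]
  · simp [hA, hB]

-- ===== VERDICT (by name: the statement is the Claim_ definition above) =====
theorem smooth_grid_data_py_spec : Claim_equal_smooth_grid_data_py := by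
  intro grid _ _
  unfold Spec_smooth_grid_data_py
  cases grid with
  | nil => rfl
  | cons g0 rest =>
    simp only [smooth_grid_data_py, smooth_grid_data_py_alt]
    apply List.map_congr_left
    intro i hi
    rw [PySem.List.mem_pyRange_one] at hi
    apply List.map_congr_left
    intro j hj
    rw [PySem.List.mem_pyRange_one] at hj
    rw [if_pos (pvNs_ne_nil (g0 :: rest) _ _ i j hi.1 hi.2 hj.1 hj.2)]
    rw [pvNs_sum (g0 :: rest) _ _ i j hi.1 hi.2 hj.1 hj.2,
        pvNs_len (g0 :: rest) _ _ i j hi.1 hi.2 hj.1 hj.2,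
        pvB_sum (g0 :: rest) _ i j hi.1 hi.2 hj.1 hj.2]
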